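-- pv_equiv track=rewrite | github.com/MikhailGer/SmartTester | src/replayer_new.py | _dup_ya_domains
-- ===== SOURCE A (Python) =====
-- def _dup_ya_domains(ck: dict) -> list[dict]:
--     d = ck.get('domain', '').lstrip('.')  # .ya.ru → ya.ru
--     copies = [ck]  # всегда возвращаем исходник
--
--     if d.endswith('ya.ru'):
--         other = ck.copy();
--         other['domain'] = '.yandex.ru'
--         copies.append(other)
--     elif d.endswith('yandex.ru'):
--         other = ck.copy();
--         other['domain'] = '.ya.ru'
--         copies.append(other)
--
--     # убираем точные дубли (name, domain, path)
--     seen = set()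
--     uniq = []
--     for c in copies:
--         key = (c['name'], c.get('domain'), c.get('path'))
--         if key not in seen:
--             seen.add(key)
--             uniq.append(c)
--     return uniq
-- ===== SOURCE B (Python) =====
-- def _dup_ya_domains(ck: dict) -> list[dict]:
--     # cookie identity: cookies coincide iff (name, domain, path) coincide
--     ident = (ck['name'], ck.get('domain'), ck.get('path'))
--     d = ck.get('domain', '').lstrip('.')
--     if d.endswith('ya.ru'):
--         other = {**ck, 'domain': '.yandex.ru'}
--     elif d.endswith('yandex.ru'):
--         other = {**ck, 'domain': '.ya.ru'}
--     else:
--         return [ck]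
--     if (other['name'], other.get('domain'), other.get('path')) == ident:
--         return [ck]
--     return [ck, other]
-- ===== Notes on version B (the rewrite author's own statement) =====
-- stated objective: simpler
-- what changed: B replaces A's build-a-list-then-seen-set-dedup two-pass structure with direct early returns: it constructs the single possible cross-domain twin and compares its (name, domain, path) identity against the original's once, with no list building, no set and no loop.
import Mathlib
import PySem

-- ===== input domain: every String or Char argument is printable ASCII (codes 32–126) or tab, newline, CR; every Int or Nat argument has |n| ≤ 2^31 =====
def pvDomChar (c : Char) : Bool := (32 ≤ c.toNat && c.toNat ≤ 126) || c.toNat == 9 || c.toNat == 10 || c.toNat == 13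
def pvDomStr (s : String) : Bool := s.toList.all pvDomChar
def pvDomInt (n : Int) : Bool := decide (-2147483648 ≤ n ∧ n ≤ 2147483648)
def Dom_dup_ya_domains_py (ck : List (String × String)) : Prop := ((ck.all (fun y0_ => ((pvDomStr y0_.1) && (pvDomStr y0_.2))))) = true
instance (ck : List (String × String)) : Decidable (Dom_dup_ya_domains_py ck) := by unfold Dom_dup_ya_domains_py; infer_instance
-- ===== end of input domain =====

-- B replaces A's build-then-seen-set-dedup two-pass structure with direct early returns and a single
-- identity comparison between the original and its one possible cross-domain twin (objective: simpler).

-- ===== PORT A =====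
-- key = (c['name'], c.get('domain'), c.get('path')); the 'name' component is get? (Option) only to keep
-- the port total: none is exactly where Python raises KeyError, excluded by Pre_.
def pvKeyA (c : List (String × String)) : Option String × Option String × Option String :=
  ((PySem.Dict.mk c).get? "name", (PySem.Dict.mk c).get? "domain", (PySem.Dict.mk c).get? "path")

def pvDedupA : List (List (String × String)) → PySem.Set (Option String × Option String × Option String) →
    List (List (String × String)) → List (List (String × String))
  | [], _, uniq => uniq
  | c :: rest, seen, uniq =>
    if pvKeyA c ∈ seen then pvDedupA rest seen uniq
    else pvDedupA rest (seen.add (pvKeyA c)) (uniq ++ [c])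

def dup_ya_domains_py (ck : List (String × String)) : List (List (String × String)) :=
  -- d = ck.get('domain','').lstrip('.'): dropWhile (· == '.') is exact for lstrip with char set {'.'}
  let d : List Char := ((PySem.Dict.mk ck).getD "domain" "").toList.dropWhile (· == '.')
  let copies : List (List (String × String)) :=
    if PySem.Chars.endswith d ("ya.ru".toList) then
      [ck, ((PySem.Dict.mk ck).insert "domain" ".yandex.ru").items]
    else if PySem.Chars.endswith d ("yandex.ru".toList) then
      [ck, ((PySem.Dict.mk ck).insert "domain" ".ya.ru").items]
    else [ck]
  pvDedupA copies (PySem.Set.ofList []) []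

-- ===== PORT B =====
-- ident = (ck['name'], ck.get('domain'), ck.get('path')); the 'name' component is get? (Option) only to
-- keep the port total: none is exactly where Python raises KeyError, excluded by Pre_.
def pvIdentB (c : List (String × String)) : Option String × Option String × Option String :=
  ((PySem.Dict.mk c).get? "name", (PySem.Dict.mk c).get? "domain", (PySem.Dict.mk c).get? "path")

def dup_ya_domains_py_alt (ck : List (String × String)) : List (List (String × String)) :=
  let ident := pvIdentB ck
  let d : List Char := ((PySem.Dict.mk ck).getD "domain" "").toList.dropWhile (· == '.')
  if PySem.Chars.endswith d ("ya.ru".toList) then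
    let other := ((PySem.Dict.mk ck).insert "domain" ".yandex.ru").items  -- {**ck, 'domain': '.yandex.ru'}
    if pvIdentB other == ident then [ck] else [ck, other]
  else if PySem.Chars.endswith d ("yandex.ru".toList) then
    let other := ((PySem.Dict.mk ck).insert "domain" ".ya.ru").items      -- {**ck, 'domain': '.ya.ru'}
    if pvIdentB other == ident then [ck] else [ck, other]
  else [ck]

-- ===== PRECONDITION & SPEC =====
-- Pre_ excludes exactly the dicts without a 'name' key, on which Python A raises KeyError.
def Pre_dup_ya_domains_py (ck : List (String × String)) : Prop :=
  (PySem.Dict.mk ck).contains "name" = true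
instance (ck : List (String × String)) : Decidable (Pre_dup_ya_domains_py ck) := by
  unfold Pre_dup_ya_domains_py; infer_instance

def pvWitness_dup_ya_domains_py : (List (String × String)) := [("name", "sid"), ("domain", ".ya.ru")]

def Spec_dup_ya_domains_py (ck : List (String × String)) (out : List (List (String × String))) : Prop := out = dup_ya_domains_py_alt ck
instance (ck : List (String × String)) (out : List (List (String × String))) : Decidable (Spec_dup_ya_domains_py ck out) := by unfold Spec_dup_ya_domains_py; infer_instance

-- ===== CLAIM (what is proved, stated in full; the proofs are below) =====
def Claim_equal_dup_ya_domains_py : Prop := ∀ (ck : List (String × String)), Dom_dup_ya_domains_py ck → Pre_dup_ya_domains_py ck → Spec_dup_ya_domains_py ck (dup_ya_domains_py ck)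

-- ===== LEMMAS AND PROOFS =====

-- the dedup pass keeps both elements of a two-element list whose keys differ
theorem pvDedupA_pair (c1 c2 : List (String × String)) (h : pvKeyA c2 ≠ pvKeyA c1) :
    pvDedupA [c1, c2] (PySem.Set.ofList []) [] = [c1, c2] := by
  simp [pvDedupA, h]

theorem pvDedupA_single (c : List (String × String)) :
    pvDedupA [c] (PySem.Set.ofList []) [] = [c] := by
  simp [pvDedupA]

-- the key of the swapped copy differs from the original's key in the domain component
theorem pvKeyA_items_insert (ck : List (String × String)) (v : String)
    (h : (PySem.Dict.mk ck).get? "domain" ≠ some v) :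
    pvKeyA (((PySem.Dict.mk ck).insert "domain" v).items) ≠ pvKeyA ck := by
  intro he
  apply h
  have h2 : (PySem.Dict.mk (((PySem.Dict.mk ck).insert "domain" v).items)).get? "domain"
      = (PySem.Dict.mk ck).get? "domain" := by
    simpa [pvKeyA] using congrArg (fun p => p.2.1) he
  have h3 : (PySem.Dict.mk (((PySem.Dict.mk ck).insert "domain" v).items)).get? "domain" = some v :=
    PySem.Dict.get?_insert_self _ _ _
  exact h2.symm.trans h3

-- B's identity triple is definitionally A's dedup key
theorem pvIdentB_eq_key (c : List (String × String)) : pvIdentB c = pvKeyA c := rfl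

theorem dup_ya_domains_py_spec : Claim_equal_dup_ya_domains_py := by
  intro ck _ _
  unfold Spec_dup_ya_domains_py dup_ya_domains_py dup_ya_domains_py_alt
  by_cases h1 : PySem.Chars.endswith
      (((PySem.Dict.mk ck).getD "domain" "").toList.dropWhile (· == '.')) ("ya.ru".toList) = true
  · simp only [h1, if_true]
    have hd : (PySem.Dict.mk ck).get? "domain" ≠ some ".yandex.ru" := by
      intro hd
      have hgd : (PySem.Dict.mk ck).getD "domain" "" = ".yandex.ru" :=
        by rw [PySem.Dict.getD_eq_get?_getD, hd]; rfl
      rw [hgd] at h1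
      exact absurd h1 (by decide)
    have hne := pvKeyA_items_insert ck ".yandex.ru" hd
    rw [pvDedupA_pair _ _ hne]
    have hb : (pvIdentB (((PySem.Dict.mk ck).insert "domain" ".yandex.ru").items)
        == pvIdentB ck) = false :=
      beq_false_of_ne (by simpa [pvIdentB_eq_key] using hne)
    simp only [hb, Bool.false_eq_true, if_false]
  · simp only [eq_false_of_ne_true h1, Bool.false_eq_true, if_false]
    by_cases h2 : PySem.Chars.endswith
        (((PySem.Dict.mk ck).getD "domain" "").toList.dropWhile (· == '.')) ("yandex.ru".toList) = true
    · simp only [h2, if_true]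
      have hd : (PySem.Dict.mk ck).get? "domain" ≠ some ".ya.ru" := by
        intro hd
        have hgd : (PySem.Dict.mk ck).getD "domain" "" = ".ya.ru" :=
          by rw [PySem.Dict.getD_eq_get?_getD, hd]; rfl
        rw [hgd] at h1
        exact absurd (by decide : PySem.Chars.endswith
          ((".ya.ru" : String).toList.dropWhile (· == '.')) ("ya.ru".toList) = true) h1
      have hne := pvKeyA_items_insert ck ".ya.ru" hd
      rw [pvDedupA_pair _ _ hne]
      have hb : (pvIdentB (((PySem.Dict.mk ck).insert "domain" ".ya.ru").items)
          == pvIdentB ck) = false :=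
        beq_false_of_ne (by simpa [pvIdentB_eq_key] using hne)
      simp only [hb, Bool.false_eq_true, if_false]
    · simp only [eq_false_of_ne_true h2, Bool.false_eq_true, if_false]
      rw [pvDedupA_single ck]
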